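-- pv_equiv track=rewrite | github.com/yzl232/code_training | mianJing111111/Google/paper_cut_price_给一张L_W的纸_给一堆 l(i)_ w(i)的模板_每个size的模板有各自的price p(i)_求这张纸所能剪出的最大.py | cutProfit
-- ===== SOURCE A (Python) =====
-- def cutProfit(w, h, pieces, prices):
--     n = len(pieces)
--     dp = [[0]*(h+1) for j in range(w+1)]
--     for i in range(1, w+1):
--         for j in range(1, h+1):
--             for k in range(n):
--                 w1 = pieces[k][0];   h1 = pieces[k][1]
--                 if i>=w1 and j>=h1:  #总共i, j, i-w1, w1, j-h1, h1
--                     dp[i][j] =max(dp[i][j], prices[k] + max(dp[i-w1][j] + dp[w1][j-h1],   dp[i][j-h1] + dp[i-w1][h1]))   #每块piece都要尝试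
--     return dp[-1][-1]  #每块剩下的有2种分法
-- ===== SOURCE B (Python) =====
-- def cutProfit(w, h, pieces, prices):
--     memo = {}
--
--     def best(i, j):
--         if i == 0 or j == 0:
--             return 0
--         if (i, j) in memo:
--             return memo[(i, j)]
--         res = 0
--         for k in range(len(pieces)):
--             w1, h1 = pieces[k]
--             if w1 <= i and h1 <= j:
--                 cand = prices[k] + max(best(i - w1, j) + best(w1, j - h1),
--                                        best(i, j - h1) + best(i - w1, h1))
--                 if cand > res:
--                     res = cand
--         memo[(i, j)] = res
--         return res
--
--     return best(w, h)
-- ===== Notes on version B (the rewrite author's own statement) =====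
-- stated objective: alternative
-- what changed: Replaces A's bottom-up triple-loop over an explicit (w+1)x(h+1) table with top-down memoized recursion best(i,j) over only the reachable subrectangles, caching results in a dict.
-- outside the precondition, e.g. on cutProfit(2, 2, [(0, 1)], [5]): A returns 15, B raises RecursionError; on cutProfit(3, 3, [(1, -2)], [4]): A raises IndexError, B raises RecursionError
import Mathlib
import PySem

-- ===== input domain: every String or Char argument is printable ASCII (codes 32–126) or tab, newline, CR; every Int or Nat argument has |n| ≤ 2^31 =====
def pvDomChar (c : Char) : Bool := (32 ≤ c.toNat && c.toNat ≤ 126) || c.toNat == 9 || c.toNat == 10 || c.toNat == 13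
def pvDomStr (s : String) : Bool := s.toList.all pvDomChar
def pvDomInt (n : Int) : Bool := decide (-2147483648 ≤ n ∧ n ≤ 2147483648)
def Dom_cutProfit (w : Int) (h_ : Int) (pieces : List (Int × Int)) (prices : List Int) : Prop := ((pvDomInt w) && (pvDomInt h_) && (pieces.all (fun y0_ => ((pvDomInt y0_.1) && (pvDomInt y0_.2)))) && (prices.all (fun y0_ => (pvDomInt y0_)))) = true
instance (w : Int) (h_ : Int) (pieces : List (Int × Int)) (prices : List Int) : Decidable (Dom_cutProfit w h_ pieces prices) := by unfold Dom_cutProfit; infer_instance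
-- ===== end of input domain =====

-- B replaces A's bottom-up triple-loop table fill by top-down memoized recursion over subrectangles; equivalence of the return value is proved on Pre_ below.


-- ===== PORT A =====
-- dp[i][j] read: Python indexing (negative index = from the end) via pyGet?; the defaults [] / 0 are unreachable inside Pre_.
def pvTGet (dp : List (List Int)) (i j : Int) : Int :=
  (PySem.List.pyGet? ((PySem.List.pyGet? dp i).getD []) j).getD 0
-- dp[i][j] = v; inside Pre_ every written index is nonneg and in range, so .toNat/set are exact there.
def pvTSet (dp : List (List Int)) (i j : Int) (v : Int) : List (List Int) :=
  dp.set i.toNat (((PySem.List.pyGet? dp i).getD []).set j.toNat v)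

def cutProfit (w : Int) (h_ : Int) (pieces : List (Int × Int)) (prices : List Int) : Int :=
  let n : Int := pieces.length
  let dp0 : List (List Int) := List.replicate (w + 1).toNat (List.replicate (h_ + 1).toNat 0)
  let dp := (PySem.List.pyRange 1 (w + 1) 1).foldl (fun dp i =>
    (PySem.List.pyRange 1 (h_ + 1) 1).foldl (fun dp j =>
      (PySem.List.pyRange 0 n 1).foldl (fun dp k =>
        let pc := (PySem.List.pyGet? pieces k).getD (0, 0)
        if pc.1 ≤ i ∧ pc.2 ≤ j then
          pvTSet dp i j (max (pvTGet dp i j)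
            ((PySem.List.pyGet? prices k).getD 0 +
              max (pvTGet dp (i - pc.1) j + pvTGet dp pc.1 (j - pc.2))
                  (pvTGet dp i (j - pc.2) + pvTGet dp (i - pc.1) pc.2)))
        else dp) dp) dp) dp0
  pvTGet dp (-1) (-1)

-- ===== PORT B =====
-- best(i, j) with the memo dict threaded through; the fuel argument only makes the
-- recursion structural (inside Pre_ the fuel (w+h)+1 is never exhausted: i+j strictly decreases).
def pvBest (pieces : List (Int × Int)) (prices : List Int) :
    Nat → PySem.Dict (Int × Int) Int → Int → Int → Int × PySem.Dict (Int × Int) Int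
  | 0, memo, _, _ => (0, memo)
  | Nat.succ f, memo, i, j =>
    if i = 0 ∨ j = 0 then (0, memo)
    else match memo.get? (i, j) with
      | some v => (v, memo)
      | none =>
        let st := (List.range pieces.length).foldl (fun st k =>
          let pc := pieces.getD k (0, 0)
          if pc.1 ≤ i ∧ pc.2 ≤ j then
            let r1 := pvBest pieces prices f st.2 (i - pc.1) j
            let r2 := pvBest pieces prices f r1.2 pc.1 (j - pc.2)
            let r3 := pvBest pieces prices f r2.2 i (j - pc.2)
            let r4 := pvBest pieces prices f r3.2 (i - pc.1) pc.2
            let cand := prices.getD k 0 + max (r1.1 + r2.1) (r3.1 + r4.1)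
            (if cand > st.1 then cand else st.1, r4.2)
          else st) (0, memo)
        (st.1, st.2.insert (i, j) st.1)

def cutProfit_alt (w : Int) (h_ : Int) (pieces : List (Int × Int)) (prices : List Int) : Int :=
  (pvBest pieces prices ((w + h_).toNat + 1) PySem.Dict.empty w h_).1

-- ===== PRECONDITION & SPEC =====
-- Pre_ excludes negative sheet sizes (A raises IndexError) and sheets where some piece that fits the
-- sheet has a non-positive width/height or no price: there A either raises IndexError or returns an
-- accidental value read from partially-updated table cells, while B's recursion does not terminate
-- (RecursionError).
def Pre_cutProfit (w : Int) (h_ : Int) (pieces : List (Int × Int)) (prices : List Int) : Prop :=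
  0 ≤ w ∧ 0 ≤ h_ ∧
  ∀ k, k < pieces.length →
    (1 ≤ w ∧ 1 ≤ h_ ∧ (pieces.getD k (0, 0)).1 ≤ w ∧ (pieces.getD k (0, 0)).2 ≤ h_) →
    (1 ≤ (pieces.getD k (0, 0)).1 ∧ 1 ≤ (pieces.getD k (0, 0)).2 ∧ k < prices.length)
instance (w : Int) (h_ : Int) (pieces : List (Int × Int)) (prices : List Int) : Decidable (Pre_cutProfit w h_ pieces prices) := by unfold Pre_cutProfit; infer_instance

def pvWitness_cutProfit : Int × Int × (List (Int × Int)) × List Int := (4, 4, [(2, 2), (1, 3)], [3, 2])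

def Spec_cutProfit (w : Int) (h_ : Int) (pieces : List (Int × Int)) (prices : List Int) (out : Int) : Prop := out = cutProfit_alt w h_ pieces prices
instance (w : Int) (h_ : Int) (pieces : List (Int × Int)) (prices : List Int) (out : Int) : Decidable (Spec_cutProfit w h_ pieces prices out) := by unfold Spec_cutProfit; infer_instance

-- ===== CLAIM (what is proved, stated in full; the proofs are below) =====
def Claim_equal_cutProfit : Prop := ∀ (w : Int) (h_ : Int) (pieces : List (Int × Int)) (prices : List Int), Dom_cutProfit w h_ pieces prices → Pre_cutProfit w h_ pieces prices → Spec_cutProfit w h_ pieces prices (cutProfit w h_ pieces prices)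

-- ===== LEMMAS AND PROOFS =====

-- The shared pure recurrence both ports compute.
def pvPure (pieces : List (Int × Int)) (prices : List Int) : Nat → Int → Int → Int
  | 0, _, _ => 0
  | Nat.succ f, i, j =>
    if i = 0 ∨ j = 0 then 0
    else (List.range pieces.length).foldl (fun res k =>
      let pc := pieces.getD k (0, 0)
      if pc.1 ≤ i ∧ pc.2 ≤ j then
        let cand := prices.getD k 0 +
          max (pvPure pieces prices f (i - pc.1) j + pvPure pieces prices f pc.1 (j - pc.2))
              (pvPure pieces prices f i (j - pc.2) + pvPure pieces prices f (i - pc.1) pc.2)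
        if cand > res then cand else res
      else res) 0

def pvOK (pieces : List (Int × Int)) (prices : List Int) (w h_ : Int) : Prop :=
  ∀ k, k < pieces.length →
    (1 ≤ w ∧ 1 ≤ h_ ∧ (pieces.getD k (0, 0)).1 ≤ w ∧ (pieces.getD k (0, 0)).2 ≤ h_) →
    (1 ≤ (pieces.getD k (0, 0)).1 ∧ 1 ≤ (pieces.getD k (0, 0)).2 ∧ k < prices.length)

theorem pvPure_stable (pieces : List (Int × Int)) (prices : List Int) (w h_ : Int)
    (H : pvOK pieces prices w h_) :
    ∀ f g : Nat, ∀ i j : Int, 0 ≤ i → i ≤ w → 0 ≤ j → j ≤ h_ →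
      (i + j).toNat < f → (i + j).toNat < g →
      pvPure pieces prices f i j = pvPure pieces prices g i j := by
  intro f
  induction f with
  | zero => intro g i j hi _ hj _ hf _; omega
  | succ f ih =>
    intro g i j hi hiw hj hjh hf hg
    cases g with
    | zero => omega
    | succ g =>
      simp only [pvPure]
      by_cases hbase : i = 0 ∨ j = 0
      · simp [hbase]
      · rw [if_neg hbase, if_neg hbase]
        have hbase' : ¬ i = 0 ∧ ¬ j = 0 := not_or.mp hbase
        apply PySem.List.foldl_congr_mem
        intro acc k hk
        have hklen : k < pieces.length := List.mem_range.mp hk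
        by_cases hfit : (pieces.getD k (0, 0)).1 ≤ i ∧ (pieces.getD k (0, 0)).2 ≤ j
        · obtain ⟨hp1, hp2, _⟩ := H k hklen ⟨by omega, by omega, le_trans hfit.1 hiw, le_trans hfit.2 hjh⟩
          obtain ⟨hf1, hf2⟩ := hfit
          simp only [if_pos (⟨hf1, hf2⟩ : _ ∧ _)]
          rw [ih g (i - (pieces.getD k (0, 0)).1) j (by omega) (by omega) hj hjh (by omega) (by omega),
              ih g (pieces.getD k (0, 0)).1 (j - (pieces.getD k (0, 0)).2) (by omega) (by omega) (by omega) (by omega) (by omega) (by omega),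
              ih g i (j - (pieces.getD k (0, 0)).2) hi hiw (by omega) (by omega) (by omega) (by omega),
              ih g (i - (pieces.getD k (0, 0)).1) (pieces.getD k (0, 0)).2 (by omega) (by omega) (by omega) (by omega) (by omega) (by omega)]
        · simp only [if_neg hfit]

def pvB (pieces : List (Int × Int)) (prices : List Int) (i j : Int) : Int :=
  pvPure pieces prices ((i + j).toNat + 1) i j

theorem pvB_base (pieces : List (Int × Int)) (prices : List Int) (i j : Int)
    (h : i = 0 ∨ j = 0) : pvB pieces prices i j = 0 := by
  unfold pvB; simp [pvPure, h]

theorem pvB_eq (pieces : List (Int × Int)) (prices : List Int) (w h_ : Int)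
    (H : pvOK pieces prices w h_) (i j : Int)
    (hi1 : 1 ≤ i) (hiw : i ≤ w) (hj1 : 1 ≤ j) (hjh : j ≤ h_) :
    pvB pieces prices i j = (List.range pieces.length).foldl (fun res k =>
      let pc := pieces.getD k (0, 0)
      if pc.1 ≤ i ∧ pc.2 ≤ j then
        let cand := prices.getD k 0 +
          max (pvB pieces prices (i - pc.1) j + pvB pieces prices pc.1 (j - pc.2))
              (pvB pieces prices i (j - pc.2) + pvB pieces prices (i - pc.1) pc.2)
        if cand > res then cand else res
      else res) 0 := by
  conv_lhs => rw [pvB, pvPure]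
  rw [if_neg (by omega : ¬(i = 0 ∨ j = 0))]
  apply PySem.List.foldl_congr_mem
  intro acc k hk
  have hklen : k < pieces.length := List.mem_range.mp hk
  by_cases hfit : (pieces.getD k (0, 0)).1 ≤ i ∧ (pieces.getD k (0, 0)).2 ≤ j
  · obtain ⟨hp1, hp2, _⟩ := H k hklen ⟨by omega, by omega, le_trans hfit.1 hiw, le_trans hfit.2 hjh⟩
    obtain ⟨hf1, hf2⟩ := hfit
    simp only [if_pos (⟨hf1, hf2⟩ : _ ∧ _), pvB]
    rw [pvPure_stable pieces prices w h_ H ((i + j).toNat) ((i - (pieces.getD k (0, 0)).1 + j).toNat + 1) (i - (pieces.getD k (0, 0)).1) j (by omega) (by omega) (by omega) (by omega) (by omega) (by omega),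
        pvPure_stable pieces prices w h_ H ((i + j).toNat) (((pieces.getD k (0, 0)).1 + (j - (pieces.getD k (0, 0)).2)).toNat + 1) (pieces.getD k (0, 0)).1 (j - (pieces.getD k (0, 0)).2) (by omega) (by omega) (by omega) (by omega) (by omega) (by omega),
        pvPure_stable pieces prices w h_ H ((i + j).toNat) ((i + (j - (pieces.getD k (0, 0)).2)).toNat + 1) i (j - (pieces.getD k (0, 0)).2) (by omega) (by omega) (by omega) (by omega) (by omega) (by omega),
        pvPure_stable pieces prices w h_ H ((i + j).toNat) ((i - (pieces.getD k (0, 0)).1 + (pieces.getD k (0, 0)).2).toNat + 1) (i - (pieces.getD k (0, 0)).1) (pieces.getD k (0, 0)).2 (by omega) (by omega) (by omega) (by omega) (by omega) (by omega)]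
  · simp only [if_neg hfit]

def pvMInv (pieces : List (Int × Int)) (prices : List Int) (w h_ : Int)
    (memo : PySem.Dict (Int × Int) Int) : Prop :=
  ∀ a b v, memo.get? (a, b) = some v →
    0 ≤ a ∧ a ≤ w ∧ 0 ≤ b ∧ b ≤ h_ ∧ v = pvB pieces prices a b

theorem pvBest_fold (pieces : List (Int × Int)) (prices : List Int) (w h_ : Int)
    (H : pvOK pieces prices w h_) (f : Nat) (i j : Int)
    (hi1 : 1 ≤ i) (hiw : i ≤ w) (hj1 : 1 ≤ j) (hjh : j ≤ h_) (hfu : (i + j).toNat ≤ f)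
    (hrec : ∀ i' j' : Int, ∀ memo, 0 ≤ i' → i' ≤ w → 0 ≤ j' → j' ≤ h_ → (i' + j').toNat < f →
      pvMInv pieces prices w h_ memo →
      (pvBest pieces prices f memo i' j').1 = pvB pieces prices i' j' ∧
      pvMInv pieces prices w h_ (pvBest pieces prices f memo i' j').2) :
    ∀ l : List Nat, (∀ k ∈ l, k < pieces.length) →
      ∀ st : Int × PySem.Dict (Int × Int) Int, pvMInv pieces prices w h_ st.2 →
      (l.foldl (fun st k =>
          let pc := pieces.getD k (0, 0)
          if pc.1 ≤ i ∧ pc.2 ≤ j then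
            let r1 := pvBest pieces prices f st.2 (i - pc.1) j
            let r2 := pvBest pieces prices f r1.2 pc.1 (j - pc.2)
            let r3 := pvBest pieces prices f r2.2 i (j - pc.2)
            let r4 := pvBest pieces prices f r3.2 (i - pc.1) pc.2
            let cand := prices.getD k 0 + max (r1.1 + r2.1) (r3.1 + r4.1)
            (if cand > st.1 then cand else st.1, r4.2)
          else st) st).1 =
        l.foldl (fun res k =>
          let pc := pieces.getD k (0, 0)
          if pc.1 ≤ i ∧ pc.2 ≤ j then
            let cand := prices.getD k 0 +
              max (pvB pieces prices (i - pc.1) j + pvB pieces prices pc.1 (j - pc.2))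
                  (pvB pieces prices i (j - pc.2) + pvB pieces prices (i - pc.1) pc.2)
            if cand > res then cand else res
          else res) st.1 ∧
      pvMInv pieces prices w h_ (l.foldl (fun st k =>
          let pc := pieces.getD k (0, 0)
          if pc.1 ≤ i ∧ pc.2 ≤ j then
            let r1 := pvBest pieces prices f st.2 (i - pc.1) j
            let r2 := pvBest pieces prices f r1.2 pc.1 (j - pc.2)
            let r3 := pvBest pieces prices f r2.2 i (j - pc.2)
            let r4 := pvBest pieces prices f r3.2 (i - pc.1) pc.2
            let cand := prices.getD k 0 + max (r1.1 + r2.1) (r3.1 + r4.1)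
            (if cand > st.1 then cand else st.1, r4.2)
          else st) st).2 := by
  intro l
  induction l with
  | nil => intro _ st hst; exact ⟨rfl, hst⟩
  | cons k l ihl =>
    intro hmem st hst
    have hklen : k < pieces.length := hmem k (List.mem_cons_self ..)
    simp only [List.foldl_cons]
    by_cases hfit : (pieces.getD k (0, 0)).1 ≤ i ∧ (pieces.getD k (0, 0)).2 ≤ j
    · obtain ⟨hp1, hp2, _⟩ := H k hklen ⟨by omega, by omega, le_trans hfit.1 hiw, le_trans hfit.2 hjh⟩
      obtain ⟨hf1, hf2⟩ := hfit
      have h1 := hrec (i - (pieces.getD k (0, 0)).1) j st.2 (by omega) (by omega) (by omega) hjh (by omega) hst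
      have h2 := hrec (pieces.getD k (0, 0)).1 (j - (pieces.getD k (0, 0)).2)
        (pvBest pieces prices f st.2 (i - (pieces.getD k (0, 0)).1) j).2
        (by omega) (by omega) (by omega) (by omega) (by omega) h1.2
      have h3 := hrec i (j - (pieces.getD k (0, 0)).2) _ (by omega) hiw (by omega) (by omega) (by omega) h2.2
      have h4 := hrec (i - (pieces.getD k (0, 0)).1) (pieces.getD k (0, 0)).2 _
        (by omega) (by omega) (by omega) (by omega) (by omega) h3.2
      simp only [if_pos (⟨hf1, hf2⟩ : _ ∧ _)]
      rw [h1.1, h2.1, h3.1, h4.1]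
      exact ihl (fun x hx => hmem x (List.mem_cons_of_mem _ hx)) _ h4.2
    · simp only [if_neg hfit]
      exact ihl (fun x hx => hmem x (List.mem_cons_of_mem _ hx)) st hst

theorem pvBest_correct (pieces : List (Int × Int)) (prices : List Int) (w h_ : Int)
    (H : pvOK pieces prices w h_) :
    ∀ f : Nat, ∀ i j : Int, ∀ memo : PySem.Dict (Int × Int) Int,
      0 ≤ i → i ≤ w → 0 ≤ j → j ≤ h_ → (i + j).toNat < f →
      (∀ a b v, memo.get? (a, b) = some v →
        0 ≤ a ∧ a ≤ w ∧ 0 ≤ b ∧ b ≤ h_ ∧ v = pvB pieces prices a b) →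
      (pvBest pieces prices f memo i j).1 = pvB pieces prices i j ∧
      (∀ a b v, (pvBest pieces prices f memo i j).2.get? (a, b) = some v →
        0 ≤ a ∧ a ≤ w ∧ 0 ≤ b ∧ b ≤ h_ ∧ v = pvB pieces prices a b) := by
  intro f
  induction f with
  | zero => intro i j memo _ _ _ _ hf _; omega
  | succ f ih =>
    intro i j memo hi hiw hj hjh hf hm
    by_cases hbase : i = 0 ∨ j = 0
    · refine ⟨?_, ?_⟩
      · simp only [pvBest, if_pos hbase]
        exact (pvB_base pieces prices i j hbase).symm
      · simp only [pvBest, if_pos hbase]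
        exact hm
    · push Not at hbase
      cases hmem : memo.get? (i, j) with
      | some v =>
        obtain ⟨_, _, _, _, hv⟩ := hm i j v hmem
        refine ⟨?_, ?_⟩
        · simp only [pvBest, if_neg (by omega : ¬(i = 0 ∨ j = 0)), hmem]
          exact hv
        · simp only [pvBest, if_neg (by omega : ¬(i = 0 ∨ j = 0)), hmem]
          exact hm
      | none =>
        have hfold := pvBest_fold pieces prices w h_ H f i j (by omega) hiw (by omega) hjh
          (by omega) ih (List.range pieces.length)
          (fun k hk => List.mem_range.mp hk) (0, memo) hm
        simp only [pvBest, if_neg (by omega : ¬(i = 0 ∨ j = 0)), hmem]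
        refine ⟨?_, ?_⟩
        · dsimp only
          rw [hfold.1, ← pvB_eq pieces prices w h_ H i j (by omega) hiw (by omega) hjh]
        · dsimp only
          intro a b v hget
          by_cases hab : ((a, b) : Int × Int) = (i, j)
          · rw [hab, PySem.Dict.get?_insert_self] at hget
            have hv : v = _ := (Option.some_inj.mp hget).symm
            have hq := hfold.1
            refine ⟨by simp at hab; omega, by simp at hab; omega, by simp at hab; omega, by simp at hab; omega, ?_⟩
            rw [hv, hq, ← pvB_eq pieces prices w h_ H i j (by omega) hiw (by omega) hjh]
            simp at hab
            rw [hab.1, hab.2]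
          · rw [PySem.Dict.get?_insert_of_ne _ _ hab] at hget
            exact hfold.2 a b v hget

theorem cutProfit_alt_eq (w h_ : Int) (pieces : List (Int × Int)) (prices : List Int)
    (hw : 0 ≤ w) (hh : 0 ≤ h_) (H : pvOK pieces prices w h_) :
    cutProfit_alt w h_ pieces prices = pvB pieces prices w h_ := by
  unfold cutProfit_alt
  exact (pvBest_correct pieces prices w h_ H ((w + h_).toNat + 1) w h_ PySem.Dict.empty hw
    le_rfl hh le_rfl (by omega)
    (fun a b v hv => by simp [PySem.Dict.empty, PySem.Dict.get?] at hv)).1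

def pvShape (dp : List (List Int)) (w h_ : Int) : Prop :=
  dp.length = (w + 1).toNat ∧ ∀ row ∈ dp, row.length = (h_ + 1).toNat

theorem pvTGet_replicate (a b : Nat) (i j : Int) :
    pvTGet (List.replicate a (List.replicate b (0 : Int))) i j = 0 := by
  unfold pvTGet
  cases hrow : PySem.List.pyGet? (List.replicate a (List.replicate b (0 : Int))) i with
  | none => simp [PySem.List.pyGet?]
  | some row =>
    have hmem := PySem.List.mem_of_pyGet?_eq_some _ hrow
    rw [List.eq_of_mem_replicate hmem] at hrow ⊢
    simp only [Option.getD_some]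
    cases hx : PySem.List.pyGet? (List.replicate b (0 : Int)) j with
    | none => rfl
    | some x =>
      have := PySem.List.mem_of_pyGet?_eq_some _ hx
      simp [List.eq_of_mem_replicate this]

theorem pvRow_mem (dp : List (List Int)) (w h_ : Int) (hs : pvShape dp w h_)
    (i : Int) (hi : 0 ≤ i) (hiw : i ≤ w) :
    ((PySem.List.pyGet? dp i).getD []) ∈ dp := by
  have hlt : i.toNat < dp.length := by have := hs.1; omega
  rw [PySem.List.pyGet?_of_nonneg _ hi, List.getElem?_eq_getElem hlt]
  exact List.getElem_mem hlt

theorem pvShape_set (dp : List (List Int)) (w h_ : Int) (hs : pvShape dp w h_)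
    (i j : Int) (v : Int) (hi : 0 ≤ i) (hiw : i ≤ w) :
    pvShape (pvTSet dp i j v) w h_ := by
  unfold pvTSet
  refine ⟨by simpa using hs.1, ?_⟩
  intro row hrow
  rcases List.mem_or_eq_of_mem_set hrow with hmem | heq
  · exact hs.2 row hmem
  · rw [heq, List.length_set]
    exact hs.2 _ (pvRow_mem dp w h_ hs i hi hiw)

theorem pvTGet_set (dp : List (List Int)) (w h_ : Int) (hs : pvShape dp w h_)
    (i j i' j' v : Int) (hi : 0 ≤ i) (hiw : i ≤ w) (hj : 0 ≤ j) (hjh : j ≤ h_)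
    (hi' : 0 ≤ i') (hiw' : i' ≤ w) (hj' : 0 ≤ j') (hjh' : j' ≤ h_) :
    pvTGet (pvTSet dp i j v) i' j' = if i' = i ∧ j' = j then v else pvTGet dp i' j' := by
  have hlen := hs.1
  have hlt : i.toNat < dp.length := by omega
  have hlt' : i'.toNat < dp.length := by omega
  have hrow : ((PySem.List.pyGet? dp i).getD []) = dp[i.toNat] := by
    rw [PySem.List.pyGet?_of_nonneg _ hi, List.getElem?_eq_getElem hlt]; rfl
  have hrlen : dp[i.toNat].length = (h_ + 1).toNat := hs.2 _ (List.getElem_mem hlt)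
  have hrow' : ((PySem.List.pyGet? dp i').getD []) = dp[i'.toNat] := by
    rw [PySem.List.pyGet?_of_nonneg _ hi', List.getElem?_eq_getElem hlt']; rfl
  have hrlen' : dp[i'.toNat].length = (h_ + 1).toNat := hs.2 _ (List.getElem_mem hlt')
  unfold pvTGet pvTSet
  rw [hrow]
  rw [PySem.List.pyGet?_of_nonneg _ hi']
  by_cases hii : i' = i
  · subst hii
    rw [List.getElem?_set_self (by simpa using hlt')]
    simp only [Option.getD_some]
    rw [PySem.List.pyGet?_of_nonneg _ hj']
    simp
    by_cases hjj : j' = j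
    · subst hjj
      rw [List.getElem?_set_self (by omega), Option.getD_some]
      simp
    · rw [List.getElem?_set_ne (by omega)]
      rw [if_neg (by omega), hrow', PySem.List.pyGet?_of_nonneg _ hj']
  · rw [List.getElem?_set_ne (by omega), if_neg (by omega), hrow',
      PySem.List.pyGet?_of_nonneg _ hj', List.getElem?_eq_getElem hlt']
    rw [PySem.List.pyGet?_of_nonneg _ hj']
    simp

def pvCellVal (pieces : List (Int × Int)) (prices : List Int) (i j i' j' : Int) : Int :=
  if i' < i ∨ (i' = i ∧ j' < j) then pvB pieces prices i' j' else 0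

theorem pvA_cell (pieces : List (Int × Int)) (prices : List Int) (w h_ : Int)
    (H : pvOK pieces prices w h_) (i j : Int)
    (hi1 : 1 ≤ i) (hiw : i ≤ w) (hj1 : 1 ≤ j) (hjh : j ≤ h_) :
    ∀ l : List Int, (∀ k ∈ l, 0 ≤ k ∧ k < (pieces.length : Int)) →
    ∀ dp : List (List Int), ∀ acc : Int, pvShape dp w h_ →
    (∀ i' j', 0 ≤ i' → i' ≤ w → 0 ≤ j' → j' ≤ h_ → ¬(i' = i ∧ j' = j) →
      pvTGet dp i' j' = pvCellVal pieces prices i j i' j') →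
    pvTGet dp i j = acc →
    pvShape (l.foldl (fun dp k =>
        let pc := (PySem.List.pyGet? pieces k).getD (0, 0)
        if pc.1 ≤ i ∧ pc.2 ≤ j then
          pvTSet dp i j (max (pvTGet dp i j)
            ((PySem.List.pyGet? prices k).getD 0 +
              max (pvTGet dp (i - pc.1) j + pvTGet dp pc.1 (j - pc.2))
                  (pvTGet dp i (j - pc.2) + pvTGet dp (i - pc.1) pc.2)))
        else dp) dp) w h_ ∧
    (∀ i' j', 0 ≤ i' → i' ≤ w → 0 ≤ j' → j' ≤ h_ → ¬(i' = i ∧ j' = j) →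
      pvTGet (l.foldl (fun dp k =>
        let pc := (PySem.List.pyGet? pieces k).getD (0, 0)
        if pc.1 ≤ i ∧ pc.2 ≤ j then
          pvTSet dp i j (max (pvTGet dp i j)
            ((PySem.List.pyGet? prices k).getD 0 +
              max (pvTGet dp (i - pc.1) j + pvTGet dp pc.1 (j - pc.2))
                  (pvTGet dp i (j - pc.2) + pvTGet dp (i - pc.1) pc.2)))
        else dp) dp) i' j' = pvCellVal pieces prices i j i' j') ∧
    pvTGet (l.foldl (fun dp k =>
        let pc := (PySem.List.pyGet? pieces k).getD (0, 0)
        if pc.1 ≤ i ∧ pc.2 ≤ j then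
          pvTSet dp i j (max (pvTGet dp i j)
            ((PySem.List.pyGet? prices k).getD 0 +
              max (pvTGet dp (i - pc.1) j + pvTGet dp pc.1 (j - pc.2))
                  (pvTGet dp i (j - pc.2) + pvTGet dp (i - pc.1) pc.2)))
        else dp) dp) i j =
      l.foldl (fun res k =>
        let pc := (PySem.List.pyGet? pieces k).getD (0, 0)
        if pc.1 ≤ i ∧ pc.2 ≤ j then
          max res ((PySem.List.pyGet? prices k).getD 0 +
            max (pvB pieces prices (i - pc.1) j + pvB pieces prices pc.1 (j - pc.2))
                (pvB pieces prices i (j - pc.2) + pvB pieces prices (i - pc.1) pc.2))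
        else res) acc := by
  intro l
  induction l with
  | nil => intro _ dp acc hs hinv hacc; exact ⟨hs, hinv, hacc⟩
  | cons k l ihl =>
    intro hmem dp acc hs hinv hacc
    obtain ⟨hk0, hklt⟩ := hmem k (List.mem_cons_self ..)
    simp only [List.foldl_cons]
    by_cases hfit : ((PySem.List.pyGet? pieces k).getD (0, 0)).1 ≤ i ∧
        ((PySem.List.pyGet? pieces k).getD (0, 0)).2 ≤ j
    · have hpc : (PySem.List.pyGet? pieces k).getD (0, 0) = pieces.getD k.toNat (0, 0) := by
        rw [PySem.List.pyGet?_eq_some_getElem _ hk0 (by omega)]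
        simp [List.getD_eq_getElem?_getD, List.getElem?_eq_getElem (by omega : k.toNat < pieces.length)]
      have hfits : (pieces.getD k.toNat (0, 0)).1 ≤ w ∧ (pieces.getD k.toNat (0, 0)).2 ≤ h_ := by
        rw [hpc] at hfit; exact ⟨le_trans hfit.1 hiw, le_trans hfit.2 hjh⟩
      obtain ⟨hp1, hp2, _⟩ := H k.toNat (by omega) ⟨by omega, by omega, hfits.1, hfits.2⟩
      rw [← hpc] at hp1 hp2
      obtain ⟨hf1, hf2⟩ := hfit
      simp only [if_pos (⟨hf1, hf2⟩ : _ ∧ _)]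
      have e1 : pvTGet dp (i - ((PySem.List.pyGet? pieces k).getD (0, 0)).1) j =
          pvB pieces prices (i - ((PySem.List.pyGet? pieces k).getD (0, 0)).1) j := by
        rw [hinv _ _ (by omega) (by omega) (by omega) (by omega) (by omega), pvCellVal,
          if_pos (by omega)]
      have e2 : pvTGet dp ((PySem.List.pyGet? pieces k).getD (0, 0)).1
            (j - ((PySem.List.pyGet? pieces k).getD (0, 0)).2) =
          pvB pieces prices ((PySem.List.pyGet? pieces k).getD (0, 0)).1
            (j - ((PySem.List.pyGet? pieces k).getD (0, 0)).2) := by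
        rw [hinv _ _ (by omega) (by omega) (by omega) (by omega) (by omega), pvCellVal,
          if_pos (by omega)]
      have e3 : pvTGet dp i (j - ((PySem.List.pyGet? pieces k).getD (0, 0)).2) =
          pvB pieces prices i (j - ((PySem.List.pyGet? pieces k).getD (0, 0)).2) := by
        rw [hinv _ _ (by omega) (by omega) (by omega) (by omega) (by omega), pvCellVal,
          if_pos (by omega)]
      have e4 : pvTGet dp (i - ((PySem.List.pyGet? pieces k).getD (0, 0)).1)
            ((PySem.List.pyGet? pieces k).getD (0, 0)).2 =
          pvB pieces prices (i - ((PySem.List.pyGet? pieces k).getD (0, 0)).1)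
            ((PySem.List.pyGet? pieces k).getD (0, 0)).2 := by
        rw [hinv _ _ (by omega) (by omega) (by omega) (by omega) (by omega), pvCellVal,
          if_pos (by omega)]
      rw [e1, e2, e3, e4, hacc]
      refine ihl (fun x hx => hmem x (List.mem_cons_of_mem _ hx)) _ _
        (pvShape_set dp w h_ hs i j _ (by omega) hiw) ?_ ?_
      · intro i' j' hi' hiw' hj' hjh' hne
        rw [pvTGet_set dp w h_ hs i j i' j' _ (by omega) hiw (by omega) hjh hi' hiw' hj' hjh',
          if_neg hne]
        exact hinv i' j' hi' hiw' hj' hjh' hne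
      · rw [pvTGet_set dp w h_ hs i j i j _ (by omega) hiw (by omega) hjh (by omega) hiw
          (by omega) hjh, if_pos ⟨rfl, rfl⟩]
    · simp only [if_neg hfit]
      exact ihl (fun x hx => hmem x (List.mem_cons_of_mem _ hx)) dp acc hs hinv hacc

theorem pvA_cell_val (pieces : List (Int × Int)) (prices : List Int) (w h_ : Int)
    (H : pvOK pieces prices w h_) (i j : Int)
    (hi1 : 1 ≤ i) (hiw : i ≤ w) (hj1 : 1 ≤ j) (hjh : j ≤ h_) :
    (PySem.List.pyRange 0 (pieces.length : Int) 1).foldl (fun res k =>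
        let pc := (PySem.List.pyGet? pieces k).getD (0, 0)
        if pc.1 ≤ i ∧ pc.2 ≤ j then
          max res ((PySem.List.pyGet? prices k).getD 0 +
            max (pvB pieces prices (i - pc.1) j + pvB pieces prices pc.1 (j - pc.2))
                (pvB pieces prices i (j - pc.2) + pvB pieces prices (i - pc.1) pc.2))
        else res) 0 = pvB pieces prices i j := by
  rw [pvB_eq pieces prices w h_ H i j hi1 hiw hj1 hjh,
    PySem.List.pyRange_zero_natCast, List.foldl_map]
  apply PySem.List.foldl_congr_mem
  intro acc k _
  have hpc : (PySem.List.pyGet? pieces (k : Int)).getD (0, 0) = pieces.getD k (0, 0) := by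
    simp [List.getD_eq_getElem?_getD]
  have hpr : (PySem.List.pyGet? prices (k : Int)).getD 0 = prices.getD k 0 := by
    simp [List.getD_eq_getElem?_getD]
  dsimp only
  rw [hpc, hpr]
  by_cases hfit : (pieces.getD k (0, 0)).1 ≤ i ∧ (pieces.getD k (0, 0)).2 ≤ j
  · rw [if_pos hfit, if_pos hfit]
    omega
  · rw [if_neg hfit, if_neg hfit]

theorem pvA_row (pieces : List (Int × Int)) (prices : List Int) (w h_ : Int)
    (H : pvOK pieces prices w h_) (i : Int) (hi1 : 1 ≤ i) (hiw : i ≤ w) :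
    ∀ m : Nat, ∀ jlo : Int, 1 ≤ jlo → (h_ + 1 - jlo).toNat = m →
    ∀ dp : List (List Int), pvShape dp w h_ →
    (∀ i' j', 0 ≤ i' → i' ≤ w → 0 ≤ j' → j' ≤ h_ →
      pvTGet dp i' j' = pvCellVal pieces prices i jlo i' j') →
    pvShape ((PySem.List.pyRange jlo (h_ + 1) 1).foldl (fun dp j =>
      (PySem.List.pyRange 0 (pieces.length : Int) 1).foldl (fun dp k =>
        let pc := (PySem.List.pyGet? pieces k).getD (0, 0)
        if pc.1 ≤ i ∧ pc.2 ≤ j then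
          pvTSet dp i j (max (pvTGet dp i j)
            ((PySem.List.pyGet? prices k).getD 0 +
              max (pvTGet dp (i - pc.1) j + pvTGet dp pc.1 (j - pc.2))
                  (pvTGet dp i (j - pc.2) + pvTGet dp (i - pc.1) pc.2)))
        else dp) dp) dp) w h_ ∧
    (∀ i' j', 0 ≤ i' → i' ≤ w → 0 ≤ j' → j' ≤ h_ →
      pvTGet ((PySem.List.pyRange jlo (h_ + 1) 1).foldl (fun dp j =>
        (PySem.List.pyRange 0 (pieces.length : Int) 1).foldl (fun dp k =>
          let pc := (PySem.List.pyGet? pieces k).getD (0, 0)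
          if pc.1 ≤ i ∧ pc.2 ≤ j then
            pvTSet dp i j (max (pvTGet dp i j)
              ((PySem.List.pyGet? prices k).getD 0 +
                max (pvTGet dp (i - pc.1) j + pvTGet dp pc.1 (j - pc.2))
                    (pvTGet dp i (j - pc.2) + pvTGet dp (i - pc.1) pc.2)))
          else dp) dp) dp) i' j' =
        if i' < i + 1 then pvB pieces prices i' j' else 0) := by
  intro m
  induction m with
  | zero =>
    intro jlo hjlo hm dp hs hinv
    rw [PySem.List.pyRange_one_eq_nil (a := jlo) (b := h_ + 1) (by omega)]
    simp only [List.foldl_nil]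
    refine ⟨hs, ?_⟩
    intro i' j' hi' hiw' hj' hjh'
    rw [hinv i' j' hi' hiw' hj' hjh', pvCellVal]
    split_ifs with h1 h2 h2
    · rfl
    · omega
    · omega
    · rfl
  | succ m ihm =>
    intro jlo hjlo hm dp hs hinv
    rw [PySem.List.pyRange_one_cons (a := jlo) (b := h_ + 1) (by omega), List.foldl_cons]
    have hcell := pvA_cell pieces prices w h_ H i jlo hi1 hiw (by omega) (by omega)
      (PySem.List.pyRange 0 (pieces.length : Int) 1)
      (fun k hk => by
        have := PySem.List.mem_pyRange_one.mp hk
        exact ⟨this.1, this.2⟩)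
      dp 0 hs
      (fun i' j' hi' hiw' hj' hjh' _ => hinv i' j' hi' hiw' hj' hjh')
      (by rw [hinv i jlo (by omega) hiw (by omega) (by omega), pvCellVal, if_neg (by omega)])
    have hval := pvA_cell_val pieces prices w h_ H i jlo hi1 hiw (by omega) (by omega)
    refine ihm (jlo + 1) (by omega) (by omega) _ hcell.1 ?_
    intro i' j' hi' hiw' hj' hjh'
    by_cases hij : i' = i ∧ j' = jlo
    · rw [hij.1, hij.2, hcell.2.2, hval, pvCellVal, if_pos (by omega)]
    · rw [hcell.2.1 i' j' hi' hiw' hj' hjh' hij, pvCellVal, pvCellVal]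
      split_ifs with h1 h2 h2
      · rfl
      · omega
      · omega
      · rfl

theorem pvA_outer (pieces : List (Int × Int)) (prices : List Int) (w h_ : Int)
    (H : pvOK pieces prices w h_) :
    ∀ m : Nat, ∀ ilo : Int, 1 ≤ ilo → (w + 1 - ilo).toNat = m →
    ∀ dp : List (List Int), pvShape dp w h_ →
    (∀ i' j', 0 ≤ i' → i' ≤ w → 0 ≤ j' → j' ≤ h_ →
      pvTGet dp i' j' = if i' < ilo then pvB pieces prices i' j' else 0) →
    pvShape ((PySem.List.pyRange ilo (w + 1) 1).foldl (fun dp i =>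
      (PySem.List.pyRange 1 (h_ + 1) 1).foldl (fun dp j =>
        (PySem.List.pyRange 0 (pieces.length : Int) 1).foldl (fun dp k =>
          let pc := (PySem.List.pyGet? pieces k).getD (0, 0)
          if pc.1 ≤ i ∧ pc.2 ≤ j then
            pvTSet dp i j (max (pvTGet dp i j)
              ((PySem.List.pyGet? prices k).getD 0 +
                max (pvTGet dp (i - pc.1) j + pvTGet dp pc.1 (j - pc.2))
                    (pvTGet dp i (j - pc.2) + pvTGet dp (i - pc.1) pc.2)))
          else dp) dp) dp) dp) w h_ ∧
    (∀ i' j', 0 ≤ i' → i' ≤ w → 0 ≤ j' → j' ≤ h_ →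
      pvTGet ((PySem.List.pyRange ilo (w + 1) 1).foldl (fun dp i =>
        (PySem.List.pyRange 1 (h_ + 1) 1).foldl (fun dp j =>
          (PySem.List.pyRange 0 (pieces.length : Int) 1).foldl (fun dp k =>
            let pc := (PySem.List.pyGet? pieces k).getD (0, 0)
            if pc.1 ≤ i ∧ pc.2 ≤ j then
              pvTSet dp i j (max (pvTGet dp i j)
                ((PySem.List.pyGet? prices k).getD 0 +
                  max (pvTGet dp (i - pc.1) j + pvTGet dp pc.1 (j - pc.2))
                      (pvTGet dp i (j - pc.2) + pvTGet dp (i - pc.1) pc.2)))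
            else dp) dp) dp) dp) i' j' =
        if i' < w + 1 then pvB pieces prices i' j' else 0) := by
  intro m
  induction m with
  | zero =>
    intro ilo hilo hm dp hs hinv
    rw [PySem.List.pyRange_one_eq_nil (a := ilo) (b := w + 1) (by omega)]
    simp only [List.foldl_nil]
    refine ⟨hs, ?_⟩
    intro i' j' hi' hiw' hj' hjh'
    rw [hinv i' j' hi' hiw' hj' hjh']
    split_ifs with h1 h2 h2
    · rfl
    · omega
    · omega
    · rfl
  | succ m ihm =>
    intro ilo hilo hm dp hs hinv
    rw [PySem.List.pyRange_one_cons (a := ilo) (b := w + 1) (by omega), List.foldl_cons]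
    have hrow := pvA_row pieces prices w h_ H ilo hilo (by omega) (h_ + 1 - 1).toNat 1
      (by omega) rfl dp hs
      (fun i' j' hi' hiw' hj' hjh' => by
        rw [hinv i' j' hi' hiw' hj' hjh', pvCellVal]
        split_ifs with h1 h2 h2
        · rfl
        · omega
        · have hj0 : j' = 0 := by omega
          have hii : i' = ilo := by omega
          rw [hj0, hii, pvB_base pieces prices ilo 0 (Or.inr rfl)]
        · rfl)
    refine ihm (ilo + 1) (by omega) (by omega) _ hrow.1 ?_
    intro i' j' hi' hiw' hj' hjh'
    rw [hrow.2 i' j' hi' hiw' hj' hjh']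

theorem pvTGet_last (dp : List (List Int)) (w h_ : Int) (hs : pvShape dp w h_)
    (hw : 0 ≤ w) (hh : 0 ≤ h_) :
    pvTGet dp (-1) (-1) = pvTGet dp w h_ := by
  have hlen := hs.1
  have hlt : w.toNat < dp.length := by omega
  have hrlen : dp[w.toNat].length = (h_ + 1).toNat := hs.2 _ (List.getElem_mem hlt)
  have hone : dp.length - 1 = w.toNat := by omega
  have h1 : PySem.List.pyGet? dp (-1) = some dp[w.toNat] := by
    rw [PySem.List.pyGet?_neg_one, List.getLast?_eq_getElem?, hone,
      List.getElem?_eq_getElem hlt]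
  have h2 : PySem.List.pyGet? dp w = some dp[w.toNat] := by
    rw [PySem.List.pyGet?_of_nonneg _ hw, List.getElem?_eq_getElem hlt]
  have hrone : dp[w.toNat].length - 1 = h_.toNat := by omega
  have hlt2 : h_.toNat < dp[w.toNat].length := by omega
  unfold pvTGet
  rw [h1, h2, Option.getD_some, PySem.List.pyGet?_neg_one, List.getLast?_eq_getElem?,
    hrone, PySem.List.pyGet?_of_nonneg _ hh]

theorem cutProfit_eq (w h_ : Int) (pieces : List (Int × Int)) (prices : List Int)
    (hw : 0 ≤ w) (hh : 0 ≤ h_) (H : pvOK pieces prices w h_) :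
    cutProfit w h_ pieces prices = pvB pieces prices w h_ := by
  have houter := pvA_outer pieces prices w h_ H (w + 1 - 1).toNat 1 (by omega) rfl
    (List.replicate (w + 1).toNat (List.replicate (h_ + 1).toNat 0))
    ⟨by simp, fun row hr => by rw [List.eq_of_mem_replicate hr]; simp⟩
    (fun i' j' hi' hiw' hj' hjh' => by
      rw [pvTGet_replicate]
      split_ifs with h1
      · have : i' = 0 := by omega
        rw [this, pvB_base pieces prices 0 j' (Or.inl rfl)]
      · rfl)
  unfold cutProfit
  rw [pvTGet_last _ w h_ houter.1 hw hh, houter.2 w h_ hw le_rfl hh le_rfl,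
    if_pos (by omega)]

-- ===== VERDICT (by name: the statement is the Claim_ definition above) =====
theorem cutProfit_spec : Claim_equal_cutProfit := by
  intro w h_ pieces prices _ hpre
  obtain ⟨hw, hh, H⟩ := hpre
  unfold Spec_cutProfit
  rw [cutProfit_eq w h_ pieces prices hw hh H, cutProfit_alt_eq w h_ pieces prices hw hh H]
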